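-- pv_equiv track=rewrite | github.com/masterman331/Transparent-Classroom-Picker | shuffle_engine.py | chunk_into_rows_cols
-- ===== SOURCE A (Python) =====
-- def chunk_into_rows_cols(lst, cols, rows):
--     chart = []; idx = 0
--     for r in range(rows):
--         row = []
--         for c in range(cols):
--             row.append(lst[idx] if idx < len(lst) else "Empty Seat")
--             idx += 1
--         chart.append(row)
--     return chart
-- ===== SOURCE B (Python) =====
-- def chunk_into_rows_cols(lst, cols, rows):
--     width = max(cols, 0)
--     need = max(rows, 0) * width
--     padded = lst + ["Empty Seat"] * max(0, need - len(lst))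
--     return [padded[r * width:(r + 1) * width] for r in range(rows)]
-- ===== Notes on version B (the rewrite author's own statement) =====
-- stated objective: simpler
-- what changed: Replaces the nested per-cell loop with a manual index counter by a two-phase decomposition: pad the list to the grid size once, then cut it into rows by slicing.
import Mathlib
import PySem

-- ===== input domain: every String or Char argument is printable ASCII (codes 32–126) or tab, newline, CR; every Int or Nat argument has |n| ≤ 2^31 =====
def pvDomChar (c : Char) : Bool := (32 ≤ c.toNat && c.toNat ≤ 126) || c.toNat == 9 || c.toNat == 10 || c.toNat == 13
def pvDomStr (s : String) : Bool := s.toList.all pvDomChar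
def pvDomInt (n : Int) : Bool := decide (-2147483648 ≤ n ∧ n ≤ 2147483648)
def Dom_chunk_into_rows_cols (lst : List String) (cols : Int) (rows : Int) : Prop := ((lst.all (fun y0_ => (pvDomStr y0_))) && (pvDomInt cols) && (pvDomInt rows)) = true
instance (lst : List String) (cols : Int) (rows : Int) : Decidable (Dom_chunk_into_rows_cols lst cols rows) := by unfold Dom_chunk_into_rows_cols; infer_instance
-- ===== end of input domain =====

-- B replaces A's nested per-cell loop with a running index counter by a two-phase
-- decomposition (pad once to grid size, then cut into rows by slicing); objective: simpler.

-- ===== PORT A =====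
-- literal port of A: nested for-loops over range(rows)/range(cols) threading (chart, idx)
def chunk_into_rows_cols (lst : List String) (cols : Int) (rows : Int) : List (List String) :=
  let st := (PySem.List.pyRange 0 rows 1).foldl
    (fun (st : List (List String) × Int) _r =>
      let inner := (PySem.List.pyRange 0 cols 1).foldl
        (fun (st2 : List String × Int) _c =>
          (st2.1 ++ [if st2.2 < (lst.length : Int) then PySem.List.pyGetD lst st2.2 "Empty Seat" else "Empty Seat"],
           st2.2 + 1))
        (([] : List String), st.2)
      (st.1 ++ [inner.1], inner.2))
    (([] : List (List String)), (0 : Int))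
  st.1

-- ===== PORT B =====
-- literal port of Source B: pad the list to grid size, then slice it into rows
def chunk_into_rows_cols_alt (lst : List String) (cols : Int) (rows : Int) : List (List String) :=
  let width := max cols 0
  let need := max rows 0 * width
  let padded := lst ++ List.replicate (max 0 (need - (lst.length : Int))).toNat "Empty Seat"
  (PySem.List.pyRange 0 rows 1).map
    (fun r => PySem.List.slice padded (some (r * width)) (some ((r + 1) * width)))

-- ===== PRECONDITION & SPEC =====
def Spec_chunk_into_rows_cols (lst : List String) (cols : Int) (rows : Int) (out : List (List String)) : Prop := out = chunk_into_rows_cols_alt lst cols rows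
instance (lst : List String) (cols : Int) (rows : Int) (out : List (List String)) : Decidable (Spec_chunk_into_rows_cols lst cols rows out) := by unfold Spec_chunk_into_rows_cols; infer_instance

-- ===== CLAIM (what is proved, stated in full; the proofs are below) =====
def Claim_equal_chunk_into_rows_cols : Prop := ∀ (lst : List String) (cols : Int) (rows : Int), Dom_chunk_into_rows_cols lst cols rows → Spec_chunk_into_rows_cols lst cols rows (chunk_into_rows_cols lst cols rows)

-- ===== LEMMAS AND PROOFS =====

-- the grid cell at flat index i: the list entry, or the pad value past the end
def pvPad (lst : List String) (i : Nat) : String := lst.getD i "Empty Seat"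

lemma pv_cell_eq (lst : List String) (m : Nat) :
    (if (m : Int) < (lst.length : Int) then PySem.List.pyGetD lst (m : Int) "Empty Seat" else "Empty Seat")
      = pvPad lst m := by
  by_cases h : m < lst.length
  · have h' : (m : Int) < (lst.length : Int) := by exact_mod_cast h
    simp [pvPad, h', PySem.List.pyGetD_natCast]
  · have h' : ¬ ((m : Int) < (lst.length : Int)) := by exact_mod_cast h
    simp [pvPad, h', List.getD_eq_getElem?_getD, List.getElem?_eq_none (Nat.le_of_not_lt h)]

-- A's inner loop: starting at flat index m it appends the next l.length cells
lemma pv_innerGen (lst : List String) (l : List Int) (acc : List String) (m : Nat) :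
    l.foldl
      (fun (st2 : List String × Int) _ =>
        (st2.1 ++ [if st2.2 < (lst.length : Int) then PySem.List.pyGetD lst st2.2 "Empty Seat" else "Empty Seat"],
         st2.2 + 1))
      (acc, (m : Int))
    = (acc ++ (List.range l.length).map (fun c => pvPad lst (m + c)), ((m + l.length : Nat) : Int)) := by
  induction l generalizing acc m with
  | nil => simp
  | cons x t ih =>
    simp only [List.foldl_cons, pv_cell_eq]
    rw [show ((m : Int) + 1) = ((m + 1 : Nat) : Int) by push_cast; ring, ih]
    refine Prod.ext ?_ (by push_cast [List.length_cons]; ring)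
    simp only [List.length_cons, List.range_succ_eq_map, List.map_cons, List.map_map, List.append_assoc,
      Nat.add_zero, List.singleton_append]
    congr 2
    apply List.map_congr_left
    intro c _
    simp only [Function.comp]
    congr 1
    omega

-- A's outer loop: starting at flat index m it appends lr.length rows of width w
lemma pv_outerGen (lst : List String) (w : Nat) (lr : List Int) (acc : List (List String)) (m : Nat) :
    lr.foldl
      (fun (st : List (List String) × Int) _ =>
        let inner := (List.range w).map (· : Nat → Int) |>.foldl
          (fun (st2 : List String × Int) _ =>
            (st2.1 ++ [if st2.2 < (lst.length : Int) then PySem.List.pyGetD lst st2.2 "Empty Seat" else "Empty Seat"],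
             st2.2 + 1))
          (([] : List String), st.2)
        (st.1 ++ [inner.1], inner.2))
      (acc, (m : Int))
    = (acc ++ (List.range lr.length).map
          (fun r => (List.range w).map (fun c => pvPad lst (m + r * w + c))),
       ((m + lr.length * w : Nat) : Int)) := by
  induction lr generalizing acc m with
  | nil => simp
  | cons x t ih =>
    simp only [List.foldl_cons]
    rw [show (((List.range w).map (· : Nat → Int)).foldl
        (fun (st2 : List String × Int) _ =>
          (st2.1 ++ [if st2.2 < (lst.length : Int) then PySem.List.pyGetD lst st2.2 "Empty Seat" else "Empty Seat"],
           st2.2 + 1)) (([] : List String), (m : Int)))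
      = ([] ++ (List.range ((List.range w).map (· : Nat → Int)).length).map (fun c => pvPad lst (m + c)),
         ((m + ((List.range w).map (· : Nat → Int)).length : Nat) : Int)) from pv_innerGen lst _ [] m]
    simp only [List.length_map, List.length_range, List.nil_append]
    rw [ih]
    refine Prod.ext ?_ (by push_cast [List.length_cons]; ring)
    simp only [List.length_cons, List.range_succ_eq_map, List.map_cons, List.map_map, List.append_assoc,
      List.singleton_append]
    congr 1
    congr 1
    · apply List.map_congr_left
      intro c _
      congr 1
      omega
    · apply List.map_congr_left
      intro r _
      simp only [Function.comp]
      apply List.map_congr_left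
      intro c _
      congr 1
      simp only [Nat.succ_eq_add_one]
      ring

lemma pv_padded_getD (lst : List String) (p i : Nat) :
    (lst ++ List.replicate p "Empty Seat").getD i "Empty Seat" = pvPad lst i := by
  by_cases h : i < lst.length
  · simp [pvPad, List.getD_eq_getElem?_getD, List.getElem?_append_left h, h]
  · rw [pvPad, List.getD_eq_getElem?_getD, List.getD_eq_getElem?_getD,
      List.getElem?_append_right (Nat.le_of_not_lt h),
      List.getElem?_eq_none (Nat.le_of_not_lt h)]
    by_cases h2 : i - lst.length < p
    · simp [h2]
    · rw [List.getElem?_eq_none (by simpa using Nat.le_of_not_lt h2 :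
        (List.replicate p "Empty Seat").length ≤ i - lst.length)]

-- a width-w window of the padded list, starting inside it, is the row of pad cells
lemma pv_slice_row (lst : List String) (p s w : Nat)
    (hb : s + w ≤ (lst ++ List.replicate p "Empty Seat").length) :
    ((lst ++ List.replicate p "Empty Seat").drop s).take w
      = (List.range w).map (fun c => pvPad lst (s + c)) := by
  set xs := lst ++ List.replicate p "Empty Seat" with hxs
  apply List.ext_getElem
  · simp; omega
  · intro i h1 h2
    have hi : i < w := by simpa using h2
    have hsi : s + i < xs.length := by omega
    rw [List.getElem_take, List.getElem_drop]
    rw [show xs[s + i] = xs.getD (s + i) "Empty Seat" by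
      simp [List.getD_eq_getElem?_getD, List.getElem?_eq_getElem hsi]]
    rw [hxs, pv_padded_getD]
    simp

-- ===== VERDICT (by name: the statement is the Claim_ definition above) =====
theorem chunk_into_rows_cols_spec : Claim_equal_chunk_into_rows_cols := by
  intro lst cols rows _
  unfold Spec_chunk_into_rows_cols chunk_into_rows_cols chunk_into_rows_cols_alt
  set w := cols.toNat with hw
  set n := rows.toNat with hn
  have hcols : (PySem.List.pyRange 0 cols 1) = (List.range w).map (· : Nat → Int) := by
    rw [PySem.List.pyRange_one]; simp [hw]
  have hrows : (PySem.List.pyRange 0 rows 1) = (List.range n).map (· : Nat → Int) := by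
    rw [PySem.List.pyRange_one]; simp [hn]
  have hmaxc : max cols 0 = (w : Int) := by rw [hw]; omega
  have hmaxr : max rows 0 = (n : Int) := by rw [hn]; omega
  rw [hcols, hrows, hmaxc, hmaxr]
  set p := (max 0 ((n : Int) * (w : Int) - (lst.length : Int))).toNat with hp
  -- A side
  have hA := pv_outerGen lst w ((List.range n).map (· : Nat → Int)) [] 0
  rw [Nat.cast_zero] at hA
  rw [hA]
  simp only [List.length_map, List.length_range, List.nil_append]
  have hplen : (lst ++ List.replicate p "Empty Seat").length = max lst.length (n * w) := by
    simp [hp]; omega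
  rw [List.map_map]
  apply List.map_congr_left
  intro r hr
  have hrn : r < n := by simpa using hr
  simp only [Function.comp]
  rw [show ((r : Int) * (w : Int)) = (((r * w : Nat) : Int)) by push_cast; ring,
      show (((r : Int) + 1) * (w : Int)) = (((r * w : Nat) : Int) + ((w : Nat) : Int)) by push_cast; ring,
      PySem.List.slice_natCast_add]
  rw [pv_slice_row lst p (r * w) w (by
    rw [hplen]
    have h1 : r * w + w ≤ n * w := by
      have h2 := Nat.mul_le_mul_right w (Nat.succ_le_of_lt hrn)
      simpa [Nat.succ_mul] using h2
    omega)]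
  apply List.map_congr_left
  intro c _
  congr 1
  ring
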